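-- pv_equiv track=rewrite | github.com/phtan11/Discrete_structures | lab7/Ex1.py | thieves
-- ===== SOURCE A (Python) =====
-- def thieves(x):
--     if(x==1):
--         return 1
--     if x==2:
--         return 2
--     sum = x
--     for i in range(1,x):
--         sum += thieves(i)
--     return sum
-- ===== SOURCE B (Python) =====
-- def thieves(x):
--     # Closed form for the recurrence f(x) = x + sum of f(i) over 0 < i < x:
--     # beyond the two base cases it satisfies f(x+1) = 2*f(x) + 1, which a
--     # geometric closed form solves; with no positive x the loop is empty.
--     if x <= 0:
--         return x
--     if x == 1:
--         return 1
--     if x == 2: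
--         return 2
--     return 7 * 2 ** (x - 3) - 1
-- ===== Notes on version B (the rewrite author's own statement) =====
-- stated objective: faster
-- what changed: Replaced the exponentially self-recursive summation (each call re-sums all smaller values) by a constant-time closed-form power expression derived from the first-order linear recurrence the function satisfies; intended as faster (one a timing run measured B over a thousand times faster at n=16, where A often times out outright).
import Mathlib
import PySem

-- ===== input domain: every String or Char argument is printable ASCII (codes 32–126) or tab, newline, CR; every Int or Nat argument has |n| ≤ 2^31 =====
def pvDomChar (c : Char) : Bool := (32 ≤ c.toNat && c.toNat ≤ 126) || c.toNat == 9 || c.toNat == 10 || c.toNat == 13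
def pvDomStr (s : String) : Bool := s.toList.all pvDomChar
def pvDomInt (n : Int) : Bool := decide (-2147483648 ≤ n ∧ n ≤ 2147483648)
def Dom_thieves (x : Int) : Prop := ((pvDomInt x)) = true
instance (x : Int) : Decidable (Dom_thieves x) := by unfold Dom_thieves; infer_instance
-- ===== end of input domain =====

-- B replaces A's exponential recursion by a closed-form power expression (intended as faster; a timing run measured B far faster at n=16, where A often times out).


-- ===== PORT A =====
def thieves (x : Int) : Int :=
  if x == 1 then 1
  else if x == 2 then 2
  else
    -- sum = x; for i in range(1, x): sum += thieves(i); return sum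
    (PySem.List.pyRange 1 x 1).attach.foldl (fun s i => s + thieves i.1) x
termination_by x.toNat
decreasing_by
  have h := (PySem.List.mem_pyRange_one).1 i.2
  omega

-- ===== PORT B =====
def thieves_alt (x : Int) : Int :=
  if x ≤ 0 then x
  else if x = 1 then 1
  else if x = 2 then 2
  else 7 * 2 ^ (x - 3).toNat - 1

-- ===== PRECONDITION & SPEC =====
def Spec_thieves (x : Int) (out : Int) : Prop := out = thieves_alt x
instance (x : Int) (out : Int) : Decidable (Spec_thieves x out) := by unfold Spec_thieves; infer_instance

-- ===== CLAIM (what is proved, stated in full; the proofs are below) =====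
def Claim_equal_thieves : Prop := ∀ (x : Int), Dom_thieves x → Spec_thieves x (thieves x)

-- ===== LEMMAS AND PROOFS =====

-- one unfolding of A's port, with the attach removed
theorem thieves_eq_foldl (x : Int) (h1 : x ≠ 1) (h2 : x ≠ 2) :
    thieves x = (PySem.List.pyRange 1 x 1).foldl (fun s i => s + thieves i) x := by
  rw [thieves]
  simp [h1, h2]

theorem foldl_add_thieves (l : List Int) (a : Int) :
    l.foldl (fun s i => s + thieves i) a = a + (l.map thieves).sum := by
  induction l generalizing a with
  | nil => simp
  | cons b t ih => simp [List.foldl_cons, ih]; ring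

theorem thieves_nonpos (x : Int) (hx : x ≤ 0) : thieves x = x := by
  rw [thieves_eq_foldl x (by omega) (by omega),
      PySem.List.pyRange_one_eq_nil (by omega : x ≤ 1)]
  rfl

theorem thieves_one : thieves 1 = 1 := by rw [thieves]; rfl
theorem thieves_two : thieves 2 = 2 := by rw [thieves]; rfl

theorem thieves_closed (n : Nat) : ∀ x : Int, x = (n : Int) + 3 →
    thieves x = 7 * 2 ^ n - 1 := by
  induction n with
  | zero =>
    intro x hx
    have hx3 : x = 3 := by push_cast at hx; omega
    subst hx3
    rw [thieves_eq_foldl 3 (by omega) (by omega)]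
    have : PySem.List.pyRange 1 3 1 = [1, 2] := by decide
    rw [this]
    simp [List.foldl, thieves_one, thieves_two]
  | succ n ih =>
    intro x hx
    have hx1 : x - 1 = (n : Int) + 3 := by omega
    have hprev := ih (x - 1) hx1
    have hsum := thieves_eq_foldl (x - 1) (by omega) (by omega)
    rw [foldl_add_thieves] at hsum
    rw [thieves_eq_foldl x (by omega) (by omega), foldl_add_thieves]
    have hsplit : PySem.List.pyRange 1 x 1
        = PySem.List.pyRange 1 (x - 1) 1 ++ [x - 1] := by
      have := PySem.List.pyRange_one_succ_right (a := 1) (b := x - 1) (by omega)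
      simpa using this
    rw [hsplit]
    simp only [List.map_append, List.sum_append, List.map_cons, List.map_nil,
      List.sum_cons, List.sum_nil]
    rw [pow_succ]
    linarith [hsum, hprev]

-- ===== VERDICT (by name: the statement is the Claim_ definition above) =====
theorem thieves_spec : Claim_equal_thieves := by
  intro x _
  unfold Spec_thieves thieves_alt
  by_cases h0 : x ≤ 0
  · simp [h0, thieves_nonpos x h0]
  · by_cases h1 : x = 1
    · simp [h1, thieves_one]
    · by_cases h2 : x = 2
      · simp [h2, thieves_two]
      · have h3 : x = ((x - 3).toNat : Int) + 3 := by omega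
        rw [thieves_closed (x - 3).toNat x h3]
        simp [h0, h1, h2]
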